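-- pv_equiv track=rewrite | github.com/Linsongrong/stock-advisor | stock_universe.py | _normalize_eastmoney_items
-- ===== SOURCE A (Python) =====
-- from typing import Dict, List, Tuple
--
-- def _normalize_eastmoney_items(raw_items) -> List[Dict[str, str]]:
--     if isinstance(raw_items, dict):
--         items = list(raw_items.values())
--     elif isinstance(raw_items, list):
--         items = raw_items
--     else:
--         items = []
--
--     stocks: List[Dict[str, str]] = []
--     seen = set()
--     for item in items:
--         if not isinstance(item, dict):
--             continue
--         code = str(item.get("f12", "")).strip()
--         name = str(item.get("f14", "")).strip()
--         sector = str(item.get("f100", "")).strip() or "auto_broad_eastmoney"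
--         if code and code not in seen and len(code) == 6:
--             seen.add(code)
--             stocks.append({"code": code, "name": name, "sector": sector})
--     stocks.sort(key=lambda entry: entry["code"])
--     return stocks
-- ===== SOURCE B (Python) =====
-- from typing import Dict, List
--
-- def _normalize_eastmoney_items(raw_items) -> List[Dict[str, str]]:
--     if isinstance(raw_items, dict):
--         items = list(raw_items.values())
--     elif isinstance(raw_items, list):
--         items = raw_items
--     else:
--         items = []
--
--     entries: List[Dict[str, str]] = []
--     for item in items:
--         if not isinstance(item, dict):
--             continue
--         code = str(item.get("f12", "")).strip()
--         name = str(item.get("f14", "")).strip()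
--         sector = str(item.get("f100", "")).strip() or "auto_broad_eastmoney"
--         if len(code) == 6:
--             entries.append({"code": code, "name": name, "sector": sector})
--     entries.sort(key=lambda e: e["code"])  # stable: first occurrence of a code stays first
--     result: List[Dict[str, str]] = []
--     prev = None
--     for e in entries:
--         if e["code"] != prev:
--             result.append(e)
--             prev = e["code"]
--     return result
-- ===== Notes on version B (the rewrite author's own statement) =====
-- stated objective: alternative
-- what changed: A dedups with a `seen` set inside the collection loop and sorts afterwards; B appends every valid normalized entry (duplicates included), stable-sorts by code, and removes duplicates in one linear pass keeping only entries whose code differs from the previously kept one (stability guarantees the first occurrence survives, matching A).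
import Mathlib
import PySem

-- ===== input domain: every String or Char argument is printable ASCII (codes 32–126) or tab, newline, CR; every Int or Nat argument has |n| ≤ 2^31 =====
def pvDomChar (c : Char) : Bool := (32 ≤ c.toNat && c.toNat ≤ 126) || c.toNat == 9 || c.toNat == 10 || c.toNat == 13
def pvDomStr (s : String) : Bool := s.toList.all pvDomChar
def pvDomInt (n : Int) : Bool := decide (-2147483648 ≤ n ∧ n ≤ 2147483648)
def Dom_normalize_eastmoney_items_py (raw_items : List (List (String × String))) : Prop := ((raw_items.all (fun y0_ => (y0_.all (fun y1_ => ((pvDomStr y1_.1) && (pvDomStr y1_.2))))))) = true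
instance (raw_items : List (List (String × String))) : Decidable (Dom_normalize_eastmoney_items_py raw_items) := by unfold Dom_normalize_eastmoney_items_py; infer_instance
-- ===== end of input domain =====

-- B replaces A's during-the-loop `seen`-set dedup by appending every valid normalized entry,
-- stable-sorting by code, and deduplicating adjacent equal codes in one linear pass
-- (objective: alternative, same asymptotic cost).

-- ===== PORT A =====
-- shared per-item normalization (identical lines in both Pythons): returns (code, normalized dict)
def pvNorm (item : List (String × String)) : String × List (String × String) :=
  let d := PySem.Dict.ofList item
  let code := PySem.Str.strip (PySem.Dict.getD d "f12" "")
  let name := PySem.Str.strip (PySem.Dict.getD d "f14" "")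
  let sector0 := PySem.Str.strip (PySem.Dict.getD d "f100" "")
  let sector := if sector0 = "" then "auto_broad_eastmoney" else sector0
  (code, [("code", code), ("name", name), ("sector", sector)])

-- entry["code"] (the sort key in both Pythons; the key is always present in the built entries)
def pyCode (entry : List (String × String)) : String :=
  PySem.Dict.getD (PySem.Dict.ofList entry) "code" ""

-- Under the type convention raw_items is always a list of dicts, so the isinstance branches
-- reduce to items = raw_items.
def normalize_eastmoney_items_py (raw_items : List (List (String × String))) : List (List (String × String)) :=
  PySem.List.sorted
    (raw_items.foldl
      (fun (st : List (List (String × String)) × PySem.Set String) item =>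
        if (pvNorm item).1 ≠ "" ∧ PySem.Set.contains st.2 (pvNorm item).1 = false ∧
            PySem.Str.len (pvNorm item).1 = 6 then
          (st.1 ++ [(pvNorm item).2], PySem.Set.add st.2 (pvNorm item).1)
        else st)
      (([] : List (List (String × String))), PySem.Set.empty)).1
    pyCode

-- ===== PORT B =====
def normalize_eastmoney_items_py_alt (raw_items : List (List (String × String))) : List (List (String × String)) :=
  let entries := raw_items.foldl
    (fun (acc : List (List (String × String))) item =>
      if PySem.Str.len (pvNorm item).1 == 6 then acc ++ [(pvNorm item).2] else acc)
    []
  let sortedE := PySem.List.sorted entries pyCode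
  (sortedE.foldl
    (fun (st : List (List (String × String)) × Option String) e =>
      if some (pyCode e) ≠ st.2 then (st.1 ++ [e], some (pyCode e)) else st)
    ([], none)).1

-- ===== PRECONDITION & SPEC =====
def Spec_normalize_eastmoney_items_py (raw_items : List (List (String × String))) (out : List (List (String × String))) : Prop := out = normalize_eastmoney_items_py_alt raw_items
instance (raw_items : List (List (String × String))) (out : List (List (String × String))) : Decidable (Spec_normalize_eastmoney_items_py raw_items out) := by unfold Spec_normalize_eastmoney_items_py; infer_instance

-- ===== CLAIM (what is proved, stated in full; the proofs are below) =====
def Claim_equal_normalize_eastmoney_items_py : Prop := ∀ (raw_items : List (List (String × String))), Dom_normalize_eastmoney_items_py raw_items → Spec_normalize_eastmoney_items_py raw_items (normalize_eastmoney_items_py raw_items)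

-- ===== LEMMAS AND PROOFS =====

-- first-occurrence dedup by key, as A's loop performs it
def pvDdF {α : Type} (k : α → String) (seen : PySem.Set String) : List α → List α
  | [] => []
  | e :: t =>
    if PySem.Set.contains seen (k e) = true then pvDdF k seen t
    else e :: pvDdF k (PySem.Set.add seen (k e)) t

-- adjacent dedup by key, as B's final pass performs it
def pvAdj {α : Type} (k : α → String) (p : Option String) : List α → List α
  | [] => []
  | e :: t => if some (k e) ≠ p then e :: pvAdj k (some (k e)) t else pvAdj k p t

lemma pvNorm_code (item : List (String × String)) : pyCode (pvNorm item).2 = (pvNorm item).1 := rfl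

lemma pvLen6_ne_empty (s : String) (h : PySem.Str.len s = 6) : s ≠ "" := by
  intro he; subst he; simp [PySem.Str.len_eq] at h

-- stability of PySem's insertion sort, one insertion step
lemma pvFilter_insertBy {α : Type} (k : α → String) (c : String) (x : α) (acc : List α)
    (h : acc.Pairwise (fun a b => k a ≤ k b)) :
    (PySem.List.insertBy (fun a b => decide (k a < k b)) x acc).filter (fun y => k y == c)
      = acc.filter (fun y => k y == c) ++ if k x == c then [x] else [] := by
  induction acc with
  | nil =>
    by_cases hxc : k x = c <;> simp [PySem.List.insertBy, hxc]
  | cons y ys ih =>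
    rw [List.pairwise_cons] at h
    obtain ⟨hy, hys⟩ := h
    by_cases hlt : k x < k y
    · have hd : decide (k x < k y) = true := by simpa using hlt
      simp only [PySem.List.insertBy, hd, if_true]
      rw [List.filter_cons]
      by_cases hxc : k x = c
      · have hz : ∀ z ∈ y :: ys, ¬ ((fun y => k y == c) z = true) := by
          intro z hz hc
          have h1 : k y ≤ k z := by
            rcases List.mem_cons.mp hz with h | h
            · exact le_of_eq (by rw [h])
            · exact hy z h
          have h2 : k x < k z := lt_of_lt_of_le hlt h1
          have hzc : k z = c := by simpa using hc
          rw [hzc, hxc] at h2; exact lt_irrefl _ h2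
        rw [List.filter_eq_nil_iff.mpr hz]
        simp [hxc]
      · simp [hxc]
    · have hd : decide (k x < k y) = false := by simpa using hlt
      simp only [PySem.List.insertBy, hd, Bool.false_eq_true, if_false]
      rw [List.filter_cons, List.filter_cons, ih hys]
      by_cases hyc : k y = c <;> simp [hyc]

-- stability of PySem's sort: filtering one key class commutes with sorting
lemma pvFilter_sorted {α : Type} (k : α → String) (c : String) (L : List α) :
    (PySem.List.sorted L k).filter (fun y => k y == c) = L.filter (fun y => k y == c) := by
  induction L using List.reverseRecOn with
  | nil => simp [PySem.List.sorted_eq_foldl_insertBy]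
  | append_singleton L x ih =>
    have hstep : PySem.List.sorted (L ++ [x]) k
        = PySem.List.insertBy (fun a b => decide (k a < k b)) x (PySem.List.sorted L k) := by
      rw [PySem.List.sorted_eq_foldl_insertBy, List.foldl_append, ← PySem.List.sorted_eq_foldl_insertBy]
      rfl
    rw [hstep, pvFilter_insertBy k c x _ (PySem.List.sorted_pairwise L k), ih, List.filter_append]
    by_cases hxc : k x = c <;> simp [hxc]

-- membership in the adjacent-dedup of a key-sorted list: exactly the head of each key class
lemma pvMem_pvAdj {α : Type} (k : α → String) :
    ∀ (S : List α) (p : Option String), S.Pairwise (fun a b => k a ≤ k b) →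
      (∀ y ∈ S, ∀ pc, p = some pc → pc ≤ k y) →
      ∀ e, e ∈ pvAdj k p S ↔
        (some (k e) ≠ p ∧ (S.filter (fun y => k y == k e)).head? = some e) := by
  intro S
  induction S with
  | nil => intro p _ _ e; simp [pvAdj]
  | cons x t ih =>
    intro p hpw hp e
    rw [List.pairwise_cons] at hpw
    obtain ⟨hx, ht⟩ := hpw
    by_cases hne : some (k x) ≠ p
    · simp only [pvAdj]
      rw [if_pos hne]
      have ihx := ih (some (k x)) ht (by intro y hy pc hpc; cases hpc; exact hx y hy) e
      by_cases hex : e = x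
      · subst hex
        simp [hne]
      · rw [List.mem_cons]
        simp only [hex, false_or]
        rw [ihx]
        by_cases hke : k e = k x
        · constructor
          · rintro ⟨h1, _⟩; exact absurd (congrArg some hke) h1
          · rintro ⟨_, h2⟩
            rw [List.filter_cons] at h2
            have : (k x == k e) = true := by simp [hke]
            rw [this] at h2
            simp at h2
            exact absurd h2.symm hex
        · have hfil : (x :: t).filter (fun y => k y == k e) = t.filter (fun y => k y == k e) := by
            rw [List.filter_cons]
            have : (k x == k e) = false := by simp; exact fun h => hke h.symm
            rw [this]; simp
          rw [hfil]
          constructor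
          · rintro ⟨_, h2⟩
            refine ⟨?_, h2⟩
            rcases p with _ | pc
            · simp
            · have hmem : e ∈ t := List.mem_of_mem_filter (List.mem_of_mem_head? h2)
              have hpcx : pc ≤ k x := hp x (by simp) pc rfl
              have hpc_ne : pc ≠ k x := fun hh => hne (by rw [hh])
              have hxe : k x ≤ k e := hx e hmem
              intro hcon
              have heq : k e = pc := Option.some.inj hcon
              have hlt2 : pc < k e :=
                lt_of_le_of_lt (le_of_lt (lt_of_le_of_ne hpcx hpc_ne)) (lt_of_le_of_ne hxe (fun h => hke h.symm))
              exact ne_of_gt hlt2 heq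
          · rintro ⟨_, h2⟩
            exact ⟨fun hcon => hke (by simpa using hcon), h2⟩
    · simp only [pvAdj]
      rw [if_neg hne]
      rw [not_ne_iff] at hne
      have hp' : ∀ y ∈ t, ∀ pc, p = some pc → pc ≤ k y := by
        intro y hy pc hpc
        rw [← hne] at hpc
        cases hpc
        exact hx y hy
      rw [ih p ht hp' e]
      by_cases hke : k e = k x
      · have l1 : ¬ (some (k e) ≠ p) := by rw [← hne, hke]; simp
        simp [l1]
      · have hfil : (x :: t).filter (fun y => k y == k e) = t.filter (fun y => k y == k e) := by
          rw [List.filter_cons]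
          have : (k x == k e) = false := by simp; exact fun h => hke h.symm
          rw [this]; simp
        rw [hfil]

-- the adjacent-dedup of a key-sorted list has strictly increasing keys
lemma pvPairwise_pvAdj {α : Type} (k : α → String) :
    ∀ (S : List α) (p : Option String), S.Pairwise (fun a b => k a ≤ k b) →
      (∀ y ∈ S, ∀ pc, p = some pc → pc ≤ k y) →
      (pvAdj k p S).Pairwise (fun a b => k a < k b) ∧
        (∀ e ∈ pvAdj k p S, ∀ pc, p = some pc → pc < k e) := by
  intro S
  induction S with
  | nil => intro p _ _; simp [pvAdj]
  | cons x t ih =>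
    intro p hpw hp
    rw [List.pairwise_cons] at hpw
    obtain ⟨hx, ht⟩ := hpw
    by_cases hne : some (k x) ≠ p
    · simp only [pvAdj]
      rw [if_pos hne]
      obtain ⟨ihpw, ihbd⟩ := ih (some (k x)) ht (by intro y hy pc hpc; cases hpc; exact hx y hy)
      refine ⟨List.pairwise_cons.mpr ⟨fun e he => ihbd e he (k x) rfl, ihpw⟩, ?_⟩
      intro e he pc hpc
      subst hpc
      have hpx : pc < k x := lt_of_le_of_ne (hp x (by simp) pc rfl) (fun hh => hne (by rw [hh]))
      rcases List.mem_cons.mp he with rfl | he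
      · exact hpx
      · exact lt_trans hpx (ihbd e he (k x) rfl)
    · simp only [pvAdj]
      rw [if_neg hne]
      rw [not_ne_iff] at hne
      have hp' : ∀ y ∈ t, ∀ pc, p = some pc → pc ≤ k y := by
        intro y hy pc hpc
        rw [← hne] at hpc
        cases hpc
        exact hx y hy
      exact ih p ht hp'

-- membership in A's first-occurrence dedup: exactly the head of each key class not yet seen
lemma pvMem_pvDdF {α : Type} (k : α → String) :
    ∀ (L : List α) (seen : PySem.Set String) (e : α),
      e ∈ pvDdF k seen L ↔
        (PySem.Set.contains seen (k e) = false ∧ (L.filter (fun y => k y == k e)).head? = some e) := by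
  intro L
  induction L with
  | nil => intro seen e; simp [pvDdF]
  | cons x t ih =>
    intro seen e
    by_cases hc : PySem.Set.contains seen (k x) = true
    · simp only [pvDdF]
      rw [if_pos hc]
      by_cases hke : k e = k x
      · have hfalse : ¬ (PySem.Set.contains seen (k e) = false) := by rw [hke, hc]; simp
        rw [ih seen e]
        constructor
        · rintro ⟨h1, _⟩; exact absurd h1 hfalse
        · rintro ⟨h1, _⟩; exact absurd h1 hfalse
      · rw [ih seen e, List.filter_cons]
        have : (k x == k e) = false := by simp; exact fun h => hke h.symm
        rw [this]; simp
    · simp only [pvDdF]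
      rw [if_neg hc]
      have hcf : PySem.Set.contains seen (k x) = false := by
        cases h : PySem.Set.contains seen (k x)
        · rfl
        · exact absurd h hc
      rw [List.mem_cons, ih (PySem.Set.add seen (k x)) e]
      by_cases hke : k e = k x
      · have hfil : ((x :: t).filter (fun y => k y == k e)).head? = some x := by
          rw [List.filter_cons]
          have : (k x == k e) = true := by simp [hke]
          rw [this]; simp
        rw [hfil]
        have hadd : ¬ (PySem.Set.contains (PySem.Set.add seen (k x)) (k e) = false) := by
          have : k e ∈ PySem.Set.add seen (k x) := (PySem.Set.mem_add seen (k x) (k e)).mpr (Or.inr hke)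
          rw [(PySem.Set.contains_iff _ _).mpr this]; simp
        constructor
        · rintro (he | ⟨h1, _⟩)
          · exact ⟨by rw [hke]; exact hcf, by rw [he]⟩
          · exact absurd h1 hadd
        · rintro ⟨_, h2⟩
          exact Or.inl (Option.some.inj h2).symm
      · have hfil : (x :: t).filter (fun y => k y == k e) = t.filter (fun y => k y == k e) := by
          rw [List.filter_cons]
          have : (k x == k e) = false := by simp; exact fun h => hke h.symm
          rw [this]; simp
        rw [hfil]
        have hadd : PySem.Set.contains (PySem.Set.add seen (k x)) (k e)
            = PySem.Set.contains seen (k e) := by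
          cases h : PySem.Set.contains seen (k e)
          · have : ¬ k e ∈ PySem.Set.add seen (k x) := by
              rw [PySem.Set.mem_add]
              rintro (hm | hm)
              · rw [(PySem.Set.contains_iff _ _).mpr hm] at h; exact Bool.noConfusion h
              · exact hke hm
            cases h2 : PySem.Set.contains (PySem.Set.add seen (k x)) (k e)
            · rfl
            · exact absurd ((PySem.Set.contains_iff _ _).mp h2) this
          · have hm : k e ∈ seen := (PySem.Set.contains_iff _ _).mp h
            exact (PySem.Set.contains_iff _ _).mpr ((PySem.Set.mem_add seen (k x) (k e)).mpr (Or.inl hm))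
        rw [hadd]
        have hex : e ≠ x := fun hh => hke (by rw [hh])
        simp [hex]

-- the first-occurrence dedup has pairwise distinct keys
lemma pvKeys_pvDdF {α : Type} (k : α → String) :
    ∀ (L : List α) (seen : PySem.Set String),
      (pvDdF k seen L).Pairwise (fun a b => k a ≠ k b) := by
  intro L
  induction L with
  | nil => intro seen; simp [pvDdF]
  | cons x t ih =>
    intro seen
    by_cases hc : PySem.Set.contains seen (k x) = true
    · simp only [pvDdF]; rw [if_pos hc]; exact ih seen
    · simp only [pvDdF]; rw [if_neg hc]
      refine List.pairwise_cons.mpr ⟨?_, ih _⟩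
      intro e he
      have := ((pvMem_pvDdF k t (PySem.Set.add seen (k x)) e).mp he).1
      intro hkx
      have hm : k e ∈ PySem.Set.add seen (k x) :=
        (PySem.Set.mem_add seen (k x) (k e)).mpr (Or.inr hkx.symm)
      rw [(PySem.Set.contains_iff _ _).mpr hm] at this
      exact Bool.noConfusion this

lemma pvNodup_of_pairwise_keys {α : Type} (k : α → String) (l : List α)
    (h : l.Pairwise (fun a b => k a ≠ k b)) : l.Nodup :=
  h.imp (fun hne heq => absurd (congrArg k heq) hne)

-- the main combinatorial fact: sort-after-dedup equals adjacent-dedup-after-sort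
lemma pvMain {α : Type} (k : α → String) (L : List α) :
    PySem.List.sorted (pvDdF k PySem.Set.empty L) k = pvAdj k none (PySem.List.sorted L k) := by
  have hsp := PySem.List.sorted_pairwise L k
  have hnone : ∀ y ∈ PySem.List.sorted L k, ∀ pc, (none : Option String) = some pc → pc ≤ k y := by
    intro y _ pc hpc; simp at hpc
  obtain ⟨hadjpw, _⟩ := pvPairwise_pvAdj k (PySem.List.sorted L k) none hsp hnone
  apply PySem.List.sorted_eq_of_perm_of_pairwise_lt _ _ _ ?_ hadjpw
  have hnd1 : (pvAdj k none (PySem.List.sorted L k)).Nodup :=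
    pvNodup_of_pairwise_keys k _ (hadjpw.imp (fun h => ne_of_lt h))
  have hnd2 : (pvDdF k PySem.Set.empty L).Nodup :=
    pvNodup_of_pairwise_keys k _ (pvKeys_pvDdF k L PySem.Set.empty)
  rw [List.perm_ext_iff_of_nodup hnd1 hnd2]
  intro e
  rw [pvMem_pvAdj k (PySem.List.sorted L k) none hsp hnone e,
      pvMem_pvDdF k L PySem.Set.empty e, pvFilter_sorted k (k e) L]
  simp

-- B's final pass is pvAdj
lemma pvFold_adj {α : Type} (k : α → String) :
    ∀ (S : List α) (st : List α × Option String),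
      (S.foldl (fun st e => if some (k e) ≠ st.2 then (st.1 ++ [e], some (k e)) else st) st).1
        = st.1 ++ pvAdj k st.2 S := by
  intro S
  induction S with
  | nil => intro st; simp [pvAdj]
  | cons x t ih =>
    intro st
    simp only [List.foldl_cons, pvAdj]
    by_cases hne : some (k x) ≠ st.2
    · rw [if_pos hne, if_pos hne, ih]
      simp
    · rw [if_neg hne, if_neg hne, ih]

-- the common list of valid normalized entries, in input order
def pvEntries (raw_items : List (List (String × String))) : List (List (String × String)) :=
  (raw_items.filter (fun item => PySem.Str.len (pvNorm item).1 == 6)).map (fun item => (pvNorm item).2)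

lemma pvB_eq (raw_items : List (List (String × String))) :
    normalize_eastmoney_items_py_alt raw_items
      = pvAdj pyCode none (PySem.List.sorted (pvEntries raw_items) pyCode) := by
  unfold normalize_eastmoney_items_py_alt
  rw [PySem.List.foldl_append_if (fun item => PySem.Str.len (pvNorm item).1 == 6)
        (fun item => (pvNorm item).2) raw_items []]
  rw [pvFold_adj pyCode]
  rfl

-- A's loop is pvDdF over the same entry list
lemma pvA_fold (l : List (List (String × String)))
    (acc : List (List (String × String))) (seen : PySem.Set String) :
    (l.foldl
      (fun (st : List (List (String × String)) × PySem.Set String) item =>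
        if (pvNorm item).1 ≠ "" ∧ PySem.Set.contains st.2 (pvNorm item).1 = false ∧
            PySem.Str.len (pvNorm item).1 = 6 then
          (st.1 ++ [(pvNorm item).2], PySem.Set.add st.2 (pvNorm item).1)
        else st)
      (acc, seen)).1 = acc ++ pvDdF pyCode seen (pvEntries l) := by
  induction l generalizing acc seen with
  | nil =>
    simp only [List.foldl_nil]
    rw [show pvEntries [] = [] from rfl,
        show pvDdF pyCode seen ([] : List (List (String × String))) = [] from rfl,
        List.append_nil]
  | cons item l ih =>
    simp only [List.foldl_cons]
    by_cases h6 : PySem.Str.len (pvNorm item).1 = 6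
    · have hent : pvEntries (item :: l) = (pvNorm item).2 :: pvEntries l := by
        unfold pvEntries
        rw [List.filter_cons_of_pos (p := fun it => PySem.Str.len (pvNorm it).1 == 6) (beq_iff_eq.mpr h6), List.map_cons]
      rw [hent]
      by_cases hc : PySem.Set.contains seen (pvNorm item).1 = false
      · have hcond : (pvNorm item).1 ≠ "" ∧ PySem.Set.contains seen (pvNorm item).1 = false ∧
            PySem.Str.len (pvNorm item).1 = 6 := ⟨pvLen6_ne_empty _ h6, hc, h6⟩
        rw [if_pos hcond, ih]
        simp only [pvDdF, pvNorm_code]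
        rw [if_neg (by rw [hc]; exact fun h => Bool.noConfusion h)]
        rw [List.append_assoc]
        rfl
      · have hct : PySem.Set.contains seen (pvNorm item).1 = true := by
          cases h : PySem.Set.contains seen (pvNorm item).1
          · exact absurd h hc
          · rfl
        have hcond : ¬ ((pvNorm item).1 ≠ "" ∧ PySem.Set.contains seen (pvNorm item).1 = false ∧
            PySem.Str.len (pvNorm item).1 = 6) := by
          rintro ⟨_, h2, _⟩; rw [hct] at h2; exact Bool.noConfusion h2
        rw [if_neg hcond, ih]
        simp only [pvDdF, pvNorm_code]
        rw [if_pos hct]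
    · have hent : pvEntries (item :: l) = pvEntries l := by
        unfold pvEntries
        rw [List.filter_cons_of_neg (p := fun it => PySem.Str.len (pvNorm it).1 == 6) (fun hpa => h6 (beq_iff_eq.mp hpa))]
      have hcond : ¬ ((pvNorm item).1 ≠ "" ∧ PySem.Set.contains seen (pvNorm item).1 = false ∧
          PySem.Str.len (pvNorm item).1 = 6) := by
        rintro ⟨_, _, h3⟩; exact h6 h3
      rw [if_neg hcond, hent, ih]

lemma pvA_eq (raw_items : List (List (String × String))) :
    normalize_eastmoney_items_py raw_items
      = PySem.List.sorted (pvDdF pyCode PySem.Set.empty (pvEntries raw_items)) pyCode := by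
  unfold normalize_eastmoney_items_py
  rw [pvA_fold raw_items [] PySem.Set.empty]
  rw [List.nil_append]

-- ===== VERDICT (by name: the statement is the Claim_ definition above) =====
theorem normalize_eastmoney_items_py_spec : Claim_equal_normalize_eastmoney_items_py := by
  intro raw_items _
  unfold Spec_normalize_eastmoney_items_py
  rw [pvA_eq, pvB_eq, pvMain]
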